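-- pv_equiv track=rewrite | github.com/rishabhsahlot/Decision-Tree-Adagrad-from-scratch-for-language-classification | features.py | average_letter_distribution
-- ===== SOURCE A (Python) =====
-- def average_letter_distribution(words):  # averages the ordinal values of letters A-Z
--     ct = 0
--     tot = 0
--     for word in words:
--         for letter in word:
--             if letter.isalpha():
--                 tot += (ord(letter.lower())-ord('a'))
--                 ct += 1
--     return tot // ct
-- ===== SOURCE B (Python) =====
-- def average_letter_distribution(words):
--     # Build a frequency table of lowercased letters in one pass,
--     # then aggregate over the distinct letters.
--     freq = {}
--     for word in words:
--         for ch in word: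
--             if ch.isalpha():
--                 k = ch.lower()
--                 freq[k] = freq.get(k, 0) + 1
--     tot = sum((ord(k) - ord('a')) * c for k, c in freq.items())
--     ct = sum(freq.values())
--     return tot // ct
-- ===== Notes on version B (the rewrite author's own statement) =====
-- stated objective: alternative
-- what changed: Per-character accumulation of (count, total) is replaced by building a letter-frequency dictionary in one pass and then aggregating weighted sums over the distinct letters.
import Mathlib
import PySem

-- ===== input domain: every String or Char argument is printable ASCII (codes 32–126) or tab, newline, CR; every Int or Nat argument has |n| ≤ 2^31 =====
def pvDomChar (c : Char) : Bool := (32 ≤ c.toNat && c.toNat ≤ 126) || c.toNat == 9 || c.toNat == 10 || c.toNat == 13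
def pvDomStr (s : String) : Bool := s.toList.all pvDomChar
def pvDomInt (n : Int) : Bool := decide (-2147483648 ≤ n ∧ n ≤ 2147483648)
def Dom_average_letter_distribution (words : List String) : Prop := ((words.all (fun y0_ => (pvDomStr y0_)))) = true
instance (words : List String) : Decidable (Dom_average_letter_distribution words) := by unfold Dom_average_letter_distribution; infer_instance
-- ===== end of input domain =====

-- B replaces per-character (count,total) accumulation by a letter-frequency dictionary
-- aggregated over distinct letters (alternative decomposition, similar cost).


-- ===== PORT A =====
def average_letter_distribution (words : List String) : Int :=
  let st := words.foldl (fun (p : Int × Int) word =>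
    word.toList.foldl (fun (p : Int × Int) letter =>
      if PySem.Chars.isalpha letter then
        (p.1 + 1, p.2 + (((PySem.Chars.lowerChar letter).toNat : Int) - ('a'.toNat : Int)))
      else p) p) ((0 : Int), (0 : Int))
  PySem.Int.floordiv st.2 st.1

-- ===== PORT B =====
def average_letter_distribution_alt (words : List String) : Int :=
  let freq : PySem.Dict Char Int := words.foldl (fun d word =>
    word.toList.foldl (fun d ch =>
      if PySem.Chars.isalpha ch then
        let k := PySem.Chars.lowerChar ch
        d.insert k (d.getD k 0 + 1)
      else d) d) PySem.Dict.empty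
  let tot := (freq.items.map (fun kv => ((kv.1.toNat : Int) - ('a'.toNat : Int)) * kv.2)).sum
  let ct := freq.values.sum
  PySem.Int.floordiv tot ct

-- ===== PRECONDITION & SPEC =====
-- Pre_ excludes exactly the inputs with no alphabetic character, on which Python A
-- (and B) raises ZeroDivisionError.
def Pre_average_letter_distribution (words : List String) : Prop :=
  (words.any (fun w => w.toList.any PySem.Chars.isalpha)) = true
instance (words : List String) : Decidable (Pre_average_letter_distribution words) := by unfold Pre_average_letter_distribution; infer_instance
def pvWitness_average_letter_distribution : List String := (["ab", "c!"])
def Spec_average_letter_distribution (words : List String) (out : Int) : Prop := out = average_letter_distribution_alt words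
instance (words : List String) (out : Int) : Decidable (Spec_average_letter_distribution words out) := by unfold Spec_average_letter_distribution; infer_instance

-- ===== CLAIM (what is proved, stated in full; the proofs are below) =====
def Claim_equal_average_letter_distribution : Prop := ∀ (words : List String), Dom_average_letter_distribution words → Pre_average_letter_distribution words → Spec_average_letter_distribution words (average_letter_distribution words)

-- ===== LEMMAS AND PROOFS =====

-- the lowercased alphabetic letters of a character stream
def pvProj (cs : List Char) : List Char :=
  (cs.filter PySem.Chars.isalpha).map PySem.Chars.lowerChar

lemma pvProj_append (a b : List Char) : pvProj (a ++ b) = pvProj a ++ pvProj b := by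
  simp [pvProj, List.filter_append]

-- A's inner loop, flattened over one character list
lemma aFold (cs : List Char) (c t : Int) :
    cs.foldl (fun (p : Int × Int) letter =>
      if PySem.Chars.isalpha letter then
        (p.1 + 1, p.2 + (((PySem.Chars.lowerChar letter).toNat : Int) - ('a'.toNat : Int)))
      else p) (c, t)
    = (c + (pvProj cs).length,
       t + ((pvProj cs).map (fun k => ((k.toNat : Int) - ('a'.toNat : Int)))).sum) := by
  induction cs generalizing c t with
  | nil => simp [pvProj]
  | cons x xs ih =>
    simp only [List.foldl_cons]
    by_cases h : PySem.Chars.isalpha x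
    · rw [if_pos h, ih]
      simp only [pvProj, List.filter_cons, h, if_pos, List.map_cons, List.length_cons,
        List.sum_cons]
      refine Prod.ext ?_ ?_ <;> simp <;> ring
    · rw [if_neg h, ih]
      simp [pvProj, h]

lemma aOuter (ws : List String) (c t : Int) :
    ws.foldl (fun (p : Int × Int) word =>
      word.toList.foldl (fun (p : Int × Int) letter =>
        if PySem.Chars.isalpha letter then
          (p.1 + 1, p.2 + (((PySem.Chars.lowerChar letter).toNat : Int) - ('a'.toNat : Int)))
        else p) p) (c, t)
    = (c + (pvProj (ws.flatMap String.toList)).length,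
       t + ((pvProj (ws.flatMap String.toList)).map
              (fun k => ((k.toNat : Int) - ('a'.toNat : Int)))).sum) := by
  induction ws generalizing c t with
  | nil => simp [pvProj]
  | cons w ws ih =>
    simp only [List.foldl_cons]
    rw [aFold, ih]
    simp only [List.flatMap_cons, pvProj_append, List.length_append, List.map_append,
      List.sum_append]
    refine Prod.ext ?_ ?_ <;> simp <;> ring

-- B's inner loop turns into the counter-building loop over the projected letters
lemma bFold (cs : List Char) (d : PySem.Dict Char Int) :
    cs.foldl (fun d ch =>
      if PySem.Chars.isalpha ch then
        let k := PySem.Chars.lowerChar ch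
        d.insert k (d.getD k 0 + 1)
      else d) d
    = (pvProj cs).foldl (fun d k => d.insert k (d.getD k 0 + 1)) d := by
  induction cs generalizing d with
  | nil => simp [pvProj]
  | cons x xs ih =>
    by_cases h : PySem.Chars.isalpha x
    · simp [h, ih, pvProj]
    · simp [h, ih, pvProj]

lemma bOuter (ws : List String) (d : PySem.Dict Char Int) :
    ws.foldl (fun d word =>
      word.toList.foldl (fun d ch =>
        if PySem.Chars.isalpha ch then
          let k := PySem.Chars.lowerChar ch
          d.insert k (d.getD k 0 + 1)
        else d) d) d
    = (pvProj (ws.flatMap String.toList)).foldl (fun d k => d.insert k (d.getD k 0 + 1)) d := by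
  induction ws generalizing d with
  | nil => simp [pvProj]
  | cons w ws ih =>
    simp only [List.foldl_cons, List.flatMap_cons, pvProj_append, List.foldl_append]
    rw [bFold, ih]

lemma ofList_toFinset {α : Type} [DecidableEq α] (L : List α) :
    (PySem.Set.ofList L).toFinset = L.toFinset := by
  ext x; simp [List.mem_toFinset, PySem.Set.mem_ofList]

-- sum of f k * count k over the distinct elements = plain sum of f
lemma distinct_weighted_sum (L : List Char) (f : Char → Int) :
    ((PySem.Set.ofList L).map (fun k => f k * (L.count k : Int))).sum = (L.map f).sum := by
  have hnd : (PySem.Set.ofList L).Nodup := PySem.Set.nodup_ofList L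
  have h1 : ((PySem.Set.ofList L).toFinset.sum (fun k => f k * (L.count k : Int)))
      = ((PySem.Set.ofList L).map (fun k => f k * (L.count k : Int))).sum :=
    List.sum_toFinset _ hnd
  rw [← h1, ofList_toFinset, Finset.sum_list_map_count L f]
  apply Finset.sum_congr rfl
  intro x _
  ring

-- specializations in exactly the syntactic shape the main proof meets
lemma distinct_ord_sum (L : List Char) :
    ((PySem.Set.ofList L).map
       (fun k => ((k.toNat : Int) - ('a'.toNat : Int)) * (L.count k : Int))).sum
    = (L.map (fun k => ((k.toNat : Int) - ('a'.toNat : Int)))).sum :=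
  distinct_weighted_sum L (fun k => ((k.toNat : Int) - ('a'.toNat : Int)))

lemma distinct_count_sum (L : List Char) :
    ((PySem.Set.ofList L).map (fun k => (L.count k : Int))).sum = (L.length : Int) := by
  have h := distinct_weighted_sum L (fun _ => (1 : Int))
  simpa using h

-- ===== VERDICT (by name: the statement is the Claim_ definition above) =====
theorem average_letter_distribution_spec : Claim_equal_average_letter_distribution := by
  intro words _ _
  unfold Spec_average_letter_distribution
  unfold average_letter_distribution average_letter_distribution_alt
  simp only [aOuter, bOuter, PySem.Dict.foldl_insert_getD_add_one_eq_counter]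
  set L := pvProj (words.flatMap String.toList) with hL
  have hvals : (PySem.Dict.counter L).values = (PySem.Dict.counter L).items.map (·.2) := rfl
  rw [hvals, PySem.Dict.items_counter, List.map_map, List.map_map]
  simp only [Function.comp_def]
  rw [distinct_ord_sum, distinct_count_sum]
  simp
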